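-- pv_equiv track=rewrite | github.com/elmadjian/3EMCP-with-TCNs | feature_extraction/filter.py | _get_attr_window
-- ===== SOURCE A (Python) =====
-- def _get_attr_window(attributes):
--     x, y, conf, label = 0,0,0,0
--     for i in range(len(attributes)):
--         if attributes[i][0] == 'x':
--             x = i
--         elif attributes[i][0] == 'y':
--             y = i
--         elif attributes[i][0] == 'confidence':
--             conf = i
--         elif attributes[i][0] == 'EYE_MOVEMENT_TYPE':
--             label = i
--     return x, y, conf, label
-- ===== SOURCE B (Python) =====
-- def _get_attr_window(attributes):
--     def last_index(name):
--         # scan back-to-front; the first match from the end is the last occurrence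
--         for i in range(len(attributes) - 1, -1, -1):
--             if attributes[i][0] == name:
--                 return i
--         return 0
--     return (last_index('x'), last_index('y'),
--             last_index('confidence'), last_index('EYE_MOVEMENT_TYPE'))
-- ===== Notes on version B (the rewrite author's own statement) =====
-- stated objective: alternative
-- what changed: Replaces the single forward scan carrying four accumulator variables with four independent backward searches, each returning the first match from the end (= last occurrence) with default 0.
import Mathlib
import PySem

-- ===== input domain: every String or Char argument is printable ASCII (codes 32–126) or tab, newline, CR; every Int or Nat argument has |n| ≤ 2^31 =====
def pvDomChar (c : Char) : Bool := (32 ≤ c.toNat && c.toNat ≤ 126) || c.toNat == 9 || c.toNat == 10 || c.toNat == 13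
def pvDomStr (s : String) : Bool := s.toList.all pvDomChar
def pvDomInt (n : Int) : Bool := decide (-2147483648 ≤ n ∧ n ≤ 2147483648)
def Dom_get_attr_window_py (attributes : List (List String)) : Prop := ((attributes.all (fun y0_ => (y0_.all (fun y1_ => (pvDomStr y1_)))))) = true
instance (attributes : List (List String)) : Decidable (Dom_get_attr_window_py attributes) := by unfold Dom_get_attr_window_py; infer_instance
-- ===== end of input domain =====

-- B replaces A's single forward scan with four accumulators by four independent backward searches (first match from the end, default 0); alternative decomposition, same cost.


-- ===== PORT A =====
-- Loop over enumerated attributes; state is (x, y, conf, label); attributes[i][0] read with pyGetD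
-- (Pre_ guarantees every inner list is nonempty, exactly where Python's a[i][0] would raise IndexError).
def get_attr_window_py (attributes : List (List String)) : Int × Int × Int × Int :=
  (PySem.List.enumerate attributes 0).foldl
    (fun st p =>
      let f := PySem.List.pyGetD p.2 0 ""
      if f = "x" then (p.1, st.2.1, st.2.2.1, st.2.2.2)
      else if f = "y" then (st.1, p.1, st.2.2.1, st.2.2.2)
      else if f = "confidence" then (st.1, st.2.1, p.1, st.2.2.2)
      else if f = "EYE_MOVEMENT_TYPE" then (st.1, st.2.1, st.2.2.1, p.1)
      else st)
    (0, 0, 0, 0)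

-- ===== PORT B =====
-- last_index(name): for i in range(len-1, -1, -1): if attributes[i][0] == name: return i; return 0.
-- Ported as structural recursion over the REVERSED enumerated list (same index order, same reads).
def gawLastIndex (name : String) : List (Int × List String) → Int
  | [] => 0
  | p :: rest => if PySem.List.pyGetD p.2 0 "" = name then p.1 else gawLastIndex name rest

def get_attr_window_py_alt (attributes : List (List String)) : Int × Int × Int × Int :=
  let r := (PySem.List.enumerate attributes 0).reverse
  (gawLastIndex "x" r, gawLastIndex "y" r,
   gawLastIndex "confidence" r, gawLastIndex "EYE_MOVEMENT_TYPE" r)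

-- ===== PRECONDITION & SPEC =====
-- Pre_ excludes inputs containing an empty inner list, on which Python A raises IndexError at attributes[i][0].
def Pre_get_attr_window_py (attributes : List (List String)) : Prop :=
  ∀ a ∈ attributes, a ≠ []
instance (attributes : List (List String)) : Decidable (Pre_get_attr_window_py attributes) := by unfold Pre_get_attr_window_py; infer_instance
def pvWitness_get_attr_window_py : List (List String) := [["y"], ["x", "0.5"], ["confidence"]]

def Spec_get_attr_window_py (attributes : List (List String)) (out : Int × Int × Int × Int) : Prop := out = get_attr_window_py_alt attributes
instance (attributes : List (List String)) (out : Int × Int × Int × Int) : Decidable (Spec_get_attr_window_py attributes out) := by unfold Spec_get_attr_window_py; infer_instance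

-- ===== CLAIM (what is proved, stated in full; the proofs are below) =====
def Claim_equal_get_attr_window_py : Prop := ∀ (attributes : List (List String)), Dom_get_attr_window_py attributes → Pre_get_attr_window_py attributes → Spec_get_attr_window_py attributes (get_attr_window_py attributes)

-- ===== LEMMAS AND PROOFS =====

-- gawLastIndex generalized over the default value returned when no match is found.
def gawLastIndexD (name : String) (d : Int) : List (Int × List String) → Int
  | [] => d
  | p :: rest => if PySem.List.pyGetD p.2 0 "" = name then p.1 else gawLastIndexD name d rest

theorem gawLastIndex_eq (name : String) (l : List (Int × List String)) :
    gawLastIndex name l = gawLastIndexD name 0 l := by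
  induction l with
  | nil => rfl
  | cons p rest ih => simp [gawLastIndex, gawLastIndexD, ih]

theorem gawLastIndexD_append (name : String) (d : Int) (l : List (Int × List String))
    (p : Int × List String) :
    gawLastIndexD name d (l ++ [p])
      = gawLastIndexD name (if PySem.List.pyGetD p.2 0 "" = name then p.1 else d) l := by
  induction l with
  | nil => rfl
  | cons q rest ih => simp [gawLastIndexD, ih]

-- Loop invariant: A's forward fold from state st equals the four backward searches with
-- the components of st as defaults.
theorem gaw_loop (l : List (Int × List String)) (st : Int × Int × Int × Int) :
    l.foldl
      (fun st p =>
        let f := PySem.List.pyGetD p.2 0 ""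
        if f = "x" then (p.1, st.2.1, st.2.2.1, st.2.2.2)
        else if f = "y" then (st.1, p.1, st.2.2.1, st.2.2.2)
        else if f = "confidence" then (st.1, st.2.1, p.1, st.2.2.2)
        else if f = "EYE_MOVEMENT_TYPE" then (st.1, st.2.1, st.2.2.1, p.1)
        else st)
      st
    = (gawLastIndexD "x" st.1 l.reverse, gawLastIndexD "y" st.2.1 l.reverse,
       gawLastIndexD "confidence" st.2.2.1 l.reverse,
       gawLastIndexD "EYE_MOVEMENT_TYPE" st.2.2.2 l.reverse) := by
  induction l generalizing st with
  | nil => rfl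
  | cons p rest ih =>
    simp only [List.foldl_cons, List.reverse_cons, gawLastIndexD_append]
    rw [ih]
    by_cases hx : PySem.List.pyGetD p.2 0 "" = "x"
    · simp [hx]
    · by_cases hy : PySem.List.pyGetD p.2 0 "" = "y"
      · simp [hy]
      · by_cases hc : PySem.List.pyGetD p.2 0 "" = "confidence"
        · simp [hc]
        · by_cases hl : PySem.List.pyGetD p.2 0 "" = "EYE_MOVEMENT_TYPE"
          · simp [hl]
          · simp [hx, hy, hc, hl]

-- ===== VERDICT (by name: the statement is the Claim_ definition above) =====
theorem get_attr_window_py_spec : Claim_equal_get_attr_window_py := by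
  intro attributes _ _
  unfold Spec_get_attr_window_py get_attr_window_py get_attr_window_py_alt
  rw [gaw_loop]
  simp [gawLastIndex_eq]
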